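-- pv_equiv track=rewrite | github.com/adrischez00/consultor-ISO | backend/app/services/audit_docx_export.py | _section_10_risks
-- ===== SOURCE A (Python) =====
-- from typing import Any, Mapping, Sequence
--
-- def _has_text(value: str | None) -> bool:
--     return bool((value or "").strip())
--
-- def _section_10_risks(action_rows: Sequence[Mapping[str, str]]) -> list[str]:
--     if not action_rows:
--         return []
--     risks: list[str] = []
--     overdue = sum(1 for row in action_rows if row.get("status_key") == "overdue")
--     without_owner = sum(1 for row in action_rows if not _has_text(row.get("owner")))
--     without_due = sum(1 for row in action_rows if not _has_text(row.get("due_date")))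
--     recurrence = sum(1 for row in action_rows if row.get("recurrence_key") == "yes")
--     ineffective = sum(1 for row in action_rows if row.get("effectiveness_key") == "ineffective")
--     if overdue:
--         risks.append(f"{overdue} acciones correctivas vencidas sin cierre efectivo.")
--     if without_owner:
--         risks.append(f"{without_owner} acciones sin responsable asignado.")
--     if without_due:
--         risks.append(f"{without_due} acciones sin fecha compromiso registrada.")
--     if recurrence:
--         risks.append(f"{recurrence} casos con reincidencia detectada.")
--     if ineffective:
--         risks.append(f"{ineffective} acciones marcadas como ineficaces.")
--     return risks
-- ===== SOURCE B (Python) =====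
-- from typing import Any, Mapping, Sequence
--
-- def _has_text(value: str | None) -> bool:
--     return bool((value or "").strip())
--
-- _RISK_SPECS = [
--     ("overdue", " acciones correctivas vencidas sin cierre efectivo."),
--     ("without_owner", " acciones sin responsable asignado."),
--     ("without_due", " acciones sin fecha compromiso registrada."),
--     ("recurrence", " casos con reincidencia detectada."),
--     ("ineffective", " acciones marcadas como ineficaces."),
-- ]
--
-- def _row_tags(row: Mapping[str, str]) -> list[str]:
--     tags: list[str] = []
--     if row.get("status_key") == "overdue":
--         tags.append("overdue")
--     if not _has_text(row.get("owner")):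
--         tags.append("without_owner")
--     if not _has_text(row.get("due_date")):
--         tags.append("without_due")
--     if row.get("recurrence_key") == "yes":
--         tags.append("recurrence")
--     if row.get("effectiveness_key") == "ineffective":
--         tags.append("ineffective")
--     return tags
--
-- def _section_10_risks(action_rows: Sequence[Mapping[str, str]]) -> list[str]:
--     counts: dict[str, int] = {}
--     for row in action_rows:
--         for tag in _row_tags(row):
--             counts[tag] = counts.get(tag, 0) + 1
--     return [f"{counts[tag]}{text}" for tag, text in _RISK_SPECS if tag in counts]
-- ===== Notes on version B (the rewrite author's own statement) =====
-- stated objective: alternative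
-- what changed: B is data-driven: each row emits a list of risk tags, the flattened tags are counted in one dict of tag counts, and the messages come from a spec table of (tag, text) pairs filtered by tag presence in the counter, replacing A's five hard-coded count-then-guard blocks.
import Mathlib
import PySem

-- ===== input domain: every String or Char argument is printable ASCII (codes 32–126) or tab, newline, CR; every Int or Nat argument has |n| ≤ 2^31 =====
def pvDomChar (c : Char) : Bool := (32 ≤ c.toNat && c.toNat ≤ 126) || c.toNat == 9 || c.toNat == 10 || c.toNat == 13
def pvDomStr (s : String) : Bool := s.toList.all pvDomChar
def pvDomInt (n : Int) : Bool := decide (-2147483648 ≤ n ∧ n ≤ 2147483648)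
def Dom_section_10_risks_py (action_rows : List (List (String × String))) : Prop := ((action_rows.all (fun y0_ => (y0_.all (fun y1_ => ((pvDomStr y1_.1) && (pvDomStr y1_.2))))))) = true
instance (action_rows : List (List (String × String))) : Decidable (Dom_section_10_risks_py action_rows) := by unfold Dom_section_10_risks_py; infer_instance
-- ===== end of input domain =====

-- B is data-driven: each row emits risk TAGS, a dict counter counts the flattened tags,
-- and a spec table maps present tags to their messages (objective: alternative; same return value).

-- ===== PORT A =====
-- row.get(k): first-match lookup in the association list (Python dict has unique keys)
def pvRowGet (row : List (String × String)) (k : String) : Option String :=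
  (row.find? (fun p => p.1 == k)).map (·.2)

-- _has_text(value): bool((value or "").strip())
def pvHasText (value : Option String) : Bool :=
  match value with
  | none => false
  | some s => !(PySem.Str.strip s == "")

def section_10_risks_py (action_rows : List (List (String × String))) : List String :=
  if action_rows.isEmpty then []
  else
    let overdue : Int := action_rows.countP (fun row => pvRowGet row "status_key" == some "overdue")
    let without_owner : Int := action_rows.countP (fun row => !pvHasText (pvRowGet row "owner"))
    let without_due : Int := action_rows.countP (fun row => !pvHasText (pvRowGet row "due_date"))
    let recurrence : Int := action_rows.countP (fun row => pvRowGet row "recurrence_key" == some "yes")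
    let ineffective : Int := action_rows.countP (fun row => pvRowGet row "effectiveness_key" == some "ineffective")
    (if overdue ≠ 0 then [PySem.Int.toStr overdue ++ " acciones correctivas vencidas sin cierre efectivo."] else []) ++
    (if without_owner ≠ 0 then [PySem.Int.toStr without_owner ++ " acciones sin responsable asignado."] else []) ++
    (if without_due ≠ 0 then [PySem.Int.toStr without_due ++ " acciones sin fecha compromiso registrada."] else []) ++
    (if recurrence ≠ 0 then [PySem.Int.toStr recurrence ++ " casos con reincidencia detectada."] else []) ++
    (if ineffective ≠ 0 then [PySem.Int.toStr ineffective ++ " acciones marcadas como ineficaces."] else [])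

-- ===== PORT B =====
-- _RISK_SPECS: tag -> message text table
def pvRiskSpecs : List (String × String) :=
  [ ("overdue", " acciones correctivas vencidas sin cierre efectivo."),
    ("without_owner", " acciones sin responsable asignado."),
    ("without_due", " acciones sin fecha compromiso registrada."),
    ("recurrence", " casos con reincidencia detectada."),
    ("ineffective", " acciones marcadas como ineficaces.") ]

-- _row_tags(row): the list of risk tags this row contributes
def pvRowTags (row : List (String × String)) : List String :=
  (if pvRowGet row "status_key" == some "overdue" then ["overdue"] else []) ++
  (if !pvHasText (pvRowGet row "owner") then ["without_owner"] else []) ++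
  (if !pvHasText (pvRowGet row "due_date") then ["without_due"] else []) ++
  (if pvRowGet row "recurrence_key" == some "yes" then ["recurrence"] else []) ++
  (if pvRowGet row "effectiveness_key" == some "ineffective" then ["ineffective"] else [])

def section_10_risks_py_alt (action_rows : List (List (String × String))) : List String :=
  let counts : PySem.Dict String Int :=
    action_rows.foldl
      (fun d row => (pvRowTags row).foldl (fun d t => d.modify t 0 (· + 1)) d)
      PySem.Dict.empty
  (pvRiskSpecs.filter (fun p => counts.contains p.1)).map
    (fun p => PySem.Int.toStr (counts.getD p.1 0) ++ p.2)

-- ===== PRECONDITION & SPEC =====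
def Spec_section_10_risks_py (action_rows : List (List (String × String))) (out : List String) : Prop := out = section_10_risks_py_alt action_rows
instance (action_rows : List (List (String × String))) (out : List String) : Decidable (Spec_section_10_risks_py action_rows out) := by unfold Spec_section_10_risks_py; infer_instance

-- ===== CLAIM =====
def Claim_equal_section_10_risks_py : Prop := ∀ (action_rows : List (List (String × String))), Dom_section_10_risks_py action_rows → Spec_section_10_risks_py action_rows (section_10_risks_py action_rows)

-- ===== LEMMAS AND PROOFS =====
-- B's nested counting loop IS the Counter of the flattened tag list
theorem pvCountsEqCounter (rows : List (List (String × String))) :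
    rows.foldl (fun d row => (pvRowTags row).foldl (fun d t => d.modify t 0 (· + 1)) d)
      PySem.Dict.empty
    = PySem.Dict.counter (rows.map pvRowTags).flatten := by
  rw [PySem.Dict.counter_eq_foldl, List.foldl_flatten, List.foldl_map]

-- a row's tag list holds tag t exactly as often as the matching predicate holds (0 or 1)
theorem pvRowTagsCount (row : List (String × String)) (t : String) (p : List (String × String) → Bool)
    (ht : t = "overdue" ∧ p = (fun r => pvRowGet r "status_key" == some "overdue") ∨
          t = "without_owner" ∧ p = (fun r => !pvHasText (pvRowGet r "owner")) ∨
          t = "without_due" ∧ p = (fun r => !pvHasText (pvRowGet r "due_date")) ∨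
          t = "recurrence" ∧ p = (fun r => pvRowGet r "recurrence_key" == some "yes") ∨
          t = "ineffective" ∧ p = (fun r => pvRowGet r "effectiveness_key" == some "ineffective")) :
    (pvRowTags row).count t = if p row then 1 else 0 := by
  rcases ht with ⟨rfl, rfl⟩ | ⟨rfl, rfl⟩ | ⟨rfl, rfl⟩ | ⟨rfl, rfl⟩ | ⟨rfl, rfl⟩ <;>
    · unfold pvRowTags
      split_ifs <;> simp_all

-- the flattened tag count over all rows is A's countP
theorem pvFlattenCount (rows : List (List (String × String))) (t : String)
    (p : List (String × String) → Bool)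
    (ht : t = "overdue" ∧ p = (fun r => pvRowGet r "status_key" == some "overdue") ∨
          t = "without_owner" ∧ p = (fun r => !pvHasText (pvRowGet r "owner")) ∨
          t = "without_due" ∧ p = (fun r => !pvHasText (pvRowGet r "due_date")) ∨
          t = "recurrence" ∧ p = (fun r => pvRowGet r "recurrence_key" == some "yes") ∨
          t = "ineffective" ∧ p = (fun r => pvRowGet r "effectiveness_key" == some "ineffective")) :
    (rows.map pvRowTags).flatten.count t = rows.countP p := by
  induction rows with
  | nil => simp
  | cons r rs ih =>
    simp only [List.map_cons, List.flatten_cons, List.count_append, ih, List.countP_cons,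
      pvRowTagsCount r t p ht]
    split_ifs <;> omega

-- the counter's membership test decides "this predicate fired at least once"
theorem pvContains (rows : List (List (String × String))) (t : String)
    (p : List (String × String) → Bool)
    (ht : t = "overdue" ∧ p = (fun r => pvRowGet r "status_key" == some "overdue") ∨
          t = "without_owner" ∧ p = (fun r => !pvHasText (pvRowGet r "owner")) ∨
          t = "without_due" ∧ p = (fun r => !pvHasText (pvRowGet r "due_date")) ∨
          t = "recurrence" ∧ p = (fun r => pvRowGet r "recurrence_key" == some "yes") ∨
          t = "ineffective" ∧ p = (fun r => pvRowGet r "effectiveness_key" == some "ineffective")) :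
    (PySem.Dict.counter (rows.map pvRowTags).flatten).contains t
      = decide (rows.countP p ≠ 0) := by
  rw [PySem.Dict.contains_counter]
  have h := pvFlattenCount rows t p ht
  by_cases hm : t ∈ (rows.map pvRowTags).flatten
  · have : (rows.map pvRowTags).flatten.count t ≠ 0 := by
      have := List.count_pos_iff.mpr hm; omega
    simp [hm, h ▸ this]
  · have : (rows.map pvRowTags).flatten.count t = 0 := List.count_eq_zero.mpr hm
    simp [hm, h ▸ this]

-- ===== VERDICT =====
theorem section_10_risks_py_spec : Claim_equal_section_10_risks_py := by
  intro rows _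
  unfold Spec_section_10_risks_py section_10_risks_py section_10_risks_py_alt
  simp only [pvCountsEqCounter]
  by_cases hE : rows.isEmpty = true
  · rw [List.isEmpty_iff] at hE
    subst hE
    simp [pvRiskSpecs, PySem.Dict.contains_counter]
  · simp only [hE, Bool.false_eq_true, if_false, pvRiskSpecs, List.filter_cons, List.filter_nil,
      pvContains rows "overdue" _ (Or.inl ⟨rfl, rfl⟩),
      pvContains rows "without_owner" _ (Or.inr (Or.inl ⟨rfl, rfl⟩)),
      pvContains rows "without_due" _ (Or.inr (Or.inr (Or.inl ⟨rfl, rfl⟩))),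
      pvContains rows "recurrence" _ (Or.inr (Or.inr (Or.inr (Or.inl ⟨rfl, rfl⟩)))),
      pvContains rows "ineffective" _ (Or.inr (Or.inr (Or.inr (Or.inr ⟨rfl, rfl⟩)))),
      ne_eq, Int.natCast_eq_zero, decide_not, Bool.not_eq_eq_eq_not, Bool.not_true,
      decide_eq_false_iff_not]
    split_ifs <;>
      simp [PySem.Dict.getD_counter,
        pvFlattenCount rows "overdue" _ (Or.inl ⟨rfl, rfl⟩),
        pvFlattenCount rows "without_owner" _ (Or.inr (Or.inl ⟨rfl, rfl⟩)),
        pvFlattenCount rows "without_due" _ (Or.inr (Or.inr (Or.inl ⟨rfl, rfl⟩))),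
        pvFlattenCount rows "recurrence" _ (Or.inr (Or.inr (Or.inr (Or.inl ⟨rfl, rfl⟩)))),
        pvFlattenCount rows "ineffective" _ (Or.inr (Or.inr (Or.inr (Or.inr ⟨rfl, rfl⟩))))]
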